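-- pv_equiv track=rewrite | github.com/garricn/tradedata | src/tradedata/cli/commands/show.py | _parse_types_option
-- ===== SOURCE A (Python) =====
-- from typing import Iterable, Optional
--
-- def _parse_types_option(types: Optional[tuple[str, ...]]) -> Optional[list[str]]:
--     """Flatten repeatable/CSV types into a list."""
--     if not types:
--         return None
--     flattened: list[str] = []
--     for entry in types:
--         parts = [part.strip() for part in entry.replace(",", " ").split() if part.strip()]
--         flattened.extend(parts)
--     return flattened or None
-- ===== SOURCE B (Python) =====
-- from typing import Iterable, Optional
--
-- def _parse_types_option(types: Optional[tuple[str, ...]]) -> Optional[list[str]]: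
--     """Flatten repeatable/CSV types into a list via a character-level tokenizer."""
--     if not types:
--         return None
--     tokens: list[str] = []
--     cur: list[str] = []
--     for entry in types:
--         for ch in entry:
--             if ch == "," or ch.isspace():
--                 if cur:
--                     tokens.append("".join(cur))
--                     cur = []
--             else:
--                 cur.append(ch)
--         if cur:
--             tokens.append("".join(cur))
--             cur = []
--     return tokens or None
-- ===== Notes on version B (the rewrite author's own statement) =====
-- stated objective: alternative
-- what changed: Replaces A's replace/split/strip string-method pipeline with a hand-written single-pass character-level tokenizer that maintains a current-token accumulator and flushes it on comma/whitespace and at entry boundaries.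
import Mathlib
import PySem

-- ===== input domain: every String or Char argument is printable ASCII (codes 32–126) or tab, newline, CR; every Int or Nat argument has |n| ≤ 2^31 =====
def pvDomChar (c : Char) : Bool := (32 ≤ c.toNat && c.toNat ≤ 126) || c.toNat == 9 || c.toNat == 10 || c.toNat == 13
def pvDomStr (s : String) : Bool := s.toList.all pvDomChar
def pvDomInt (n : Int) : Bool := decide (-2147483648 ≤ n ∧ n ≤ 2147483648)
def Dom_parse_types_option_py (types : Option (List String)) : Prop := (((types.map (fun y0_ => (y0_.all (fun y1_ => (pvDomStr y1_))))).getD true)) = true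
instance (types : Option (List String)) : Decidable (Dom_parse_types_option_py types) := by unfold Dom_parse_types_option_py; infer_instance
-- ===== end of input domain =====

-- ===== PORT A =====
-- B replaces A's replace/split/strip pipeline with a hand-written one-pass character tokenizer (objective: alternative).
def parse_types_option_py (types : Option (List String)) : Option (List String) :=
  match types with
  | none => none
  | some ts =>
    if ts = [] then none
    else
      let flattened : List String :=
        ts.foldl (fun flattened entry =>
          flattened ++
            (PySem.Str.split₀ (PySem.Str.replace entry "," " ")).filterMap
              (fun part =>
                let p := PySem.Str.strip part
                if p = "" then none else some p)) []
      if flattened = [] then none else some flattened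

-- ===== PORT B =====
-- the inner per-character loop of B plus the end-of-entry flush: state = (tokens so far, current token)
def pvScanB : List Char → List String → List Char → List String
  | [], toks, cur => if cur = [] then toks else toks ++ [String.ofList cur]
  | c :: rest, toks, cur =>
    if c = ',' ∨ PySem.Chars.isspace c then
      if cur = [] then pvScanB rest toks []
      else pvScanB rest (toks ++ [String.ofList cur]) []
    else pvScanB rest toks (cur ++ [c])

def parse_types_option_py_alt (types : Option (List String)) : Option (List String) :=
  match types with
  | none => none
  | some ts =>
    if ts = [] then none
    else
      let tokens : List String := ts.foldl (fun toks entry => pvScanB entry.toList toks []) []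
      if tokens = [] then none else some tokens

-- ===== PRECONDITION & SPEC =====
def Spec_parse_types_option_py (types : Option (List String)) (out : Option (List String)) : Prop := out = parse_types_option_py_alt types
instance (types : Option (List String)) (out : Option (List String)) : Decidable (Spec_parse_types_option_py types out) := by unfold Spec_parse_types_option_py; infer_instance

-- ===== CLAIM (what is proved, stated in full; the proofs are below) =====
def Claim_equal_parse_types_option_py : Prop := ∀ (types : Option (List String)), Dom_parse_types_option_py types → Spec_parse_types_option_py types (parse_types_option_py types)

-- ===== LEMMAS AND PROOFS =====

-- the comma→space substitution as a character map
def pvCommaToSpace (c : Char) : Char := if c = ',' then ' ' else c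

-- definitional unfolding of the PySem loop bodies
theorem pvGo_nil (cur : List Char) (acc : List (List Char)) :
    PySem.Chars.split₀.go [] cur acc =
      if cur.isEmpty then acc.reverse else (cur.reverse :: acc).reverse := rfl

theorem pvGo_cons (c : Char) (rest cur : List Char) (acc : List (List Char)) :
    PySem.Chars.split₀.go (c :: rest) cur acc =
      if PySem.Chars.isspace c then
        (if cur.isEmpty then PySem.Chars.split₀.go rest [] acc
         else PySem.Chars.split₀.go rest [] (cur.reverse :: acc))
      else PySem.Chars.split₀.go rest (c :: cur) acc := rfl

theorem pvRGo_zero (l acc : List Char) :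
    PySem.Chars.replace.go [','] [' '] 0 l acc = acc.reverse ++ l := rfl

theorem pvRGo_succ (fuel : Nat) (c : Char) (t acc : List Char) :
    PySem.Chars.replace.go [','] [' '] (fuel + 1) (c :: t) acc =
      if List.isPrefixOf [','] (c :: t) then
        PySem.Chars.replace.go [','] [' '] fuel t (' ' :: acc)
      else PySem.Chars.replace.go [','] [' '] fuel t (c :: acc) := rfl

theorem pvRGo_succ_nil (fuel : Nat) (acc : List Char) :
    PySem.Chars.replace.go [','] [' '] (fuel + 1) [] acc = acc.reverse := rfl

-- single-character replace is a map
theorem pvReplaceGo_comma (l acc : List Char) (fuel : Nat) (h : l.length ≤ fuel) :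
    PySem.Chars.replace.go [','] [' '] fuel l acc = acc.reverse ++ l.map pvCommaToSpace := by
  induction fuel generalizing l acc with
  | zero =>
    have : l = [] := List.eq_nil_of_length_eq_zero (Nat.le_zero.mp h)
    subst this; simp [pvRGo_zero]
  | succ fuel ih =>
    cases l with
    | nil => simp [pvRGo_succ_nil]
    | cons c t =>
      have ht : t.length ≤ fuel := by simpa using h
      by_cases hc : c = ','
      · subst hc
        rw [pvRGo_succ, if_pos (by simp [List.isPrefixOf]), ih _ _ ht]
        simp [pvCommaToSpace]
      · rw [pvRGo_succ, if_neg (by simp [List.isPrefixOf]; exact fun hh => hc hh.symm),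
          ih _ _ ht]
        simp [pvCommaToSpace, hc]

theorem pvReplace_comma (l : List Char) :
    PySem.Chars.replace l [','] [' '] = l.map pvCommaToSpace := by
  rw [PySem.Chars.replace]
  simp only [List.isEmpty_cons, Bool.false_eq_true, if_false]
  exact pvReplaceGo_comma l [] l.length (le_refl _)

-- split₀.go: the accumulator factors out
theorem pvSplitGo_acc_out (l : List Char) (cur : List Char) (acc : List (List Char)) :
    PySem.Chars.split₀.go l cur acc = acc.reverse ++ PySem.Chars.split₀.go l cur [] := by
  induction l generalizing cur acc with
  | nil =>
    rw [pvGo_nil, pvGo_nil]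
    split_ifs <;> simp
  | cons c rest ih =>
    rw [pvGo_cons, pvGo_cons]
    split_ifs with hs hc
    · rw [ih [] acc]
    · rw [ih [] (cur.reverse :: acc), ih [] [cur.reverse]]
      simp
    · rw [ih (c :: cur) acc]

-- every split₀ token is nonempty and whitespace-free
theorem pvSplitGo_tokens (l cur : List Char) (acc : List (List Char))
    (hacc : ∀ x ∈ acc, x ≠ [] ∧ ∀ c ∈ x, PySem.Chars.isspace c = false)
    (hcur : ∀ c ∈ cur, PySem.Chars.isspace c = false) :
    ∀ x ∈ PySem.Chars.split₀.go l cur acc, x ≠ [] ∧ ∀ c ∈ x, PySem.Chars.isspace c = false := by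
  induction l generalizing cur acc with
  | nil =>
    intro x hx
    rw [pvGo_nil] at hx
    split_ifs at hx with hc
    · exact hacc x (List.mem_reverse.mp hx)
    · rcases List.mem_cons.mp (List.mem_reverse.mp hx) with h | h
      · subst h
        refine ⟨by simpa [List.isEmpty_iff] using hc, ?_⟩
        intro d hd; exact hcur d (List.mem_reverse.mp hd)
      · exact hacc x h
  | cons c rest ih =>
    intro x hx
    rw [pvGo_cons] at hx
    split_ifs at hx with hs hc
    · exact ih [] acc hacc (by simp) x hx
    · refine ih [] (cur.reverse :: acc) ?_ (by simp) x hx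
      intro y hy
      rcases List.mem_cons.mp hy with h | h
      · subst h
        refine ⟨by simpa [List.isEmpty_iff] using hc, ?_⟩
        intro d hd; exact hcur d (List.mem_reverse.mp hd)
      · exact hacc y h
    · refine ih (c :: cur) acc hacc ?_ x hx
      intro d hd
      rcases List.mem_cons.mp hd with h | h
      · subst h; simpa using hs
      · exact hcur d h

theorem pvSplit_tokens (s : List Char) :
    ∀ x ∈ PySem.Chars.split₀ s, x ≠ [] ∧ ∀ c ∈ x, PySem.Chars.isspace c = false := by
  unfold PySem.Chars.split₀
  exact pvSplitGo_tokens s [] [] (by simp) (by simp)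

-- strip is the identity on whitespace-free lists
theorem pvDropWhile_id (x : List Char) (h : ∀ c ∈ x, PySem.Chars.isspace c = false) :
    x.dropWhile PySem.Chars.isspace = x := by
  cases x with
  | nil => rfl
  | cons c t => simp [h c (by simp)]

theorem pvStrip_id (x : List Char) (h : ∀ c ∈ x, PySem.Chars.isspace c = false) :
    PySem.Chars.strip x = x := by
  unfold PySem.Chars.strip PySem.Chars.rstrip PySem.Chars.lstrip
  rw [pvDropWhile_id x h, pvDropWhile_id x.reverse (by intro c hc; exact h c (List.mem_reverse.mp hc)),
    List.reverse_reverse]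

-- A's per-entry comprehension returns exactly the split tokens
theorem pvParts_eq (e : String) :
    (PySem.Str.split₀ (PySem.Str.replace e "," " ")).filterMap
      (fun part => let p := PySem.Str.strip part; if p = "" then none else some p)
    = PySem.Str.split₀ (PySem.Str.replace e "," " ") := by
  rw [PySem.Str.split₀, List.filterMap_map]
  have hcongr : List.filterMap
      ((fun part => let p := PySem.Str.strip part; if p = "" then none else some p) ∘ String.ofList)
      (PySem.Chars.split₀ (PySem.Str.replace e "," " ").toList)
      = List.filterMap (some ∘ String.ofList)
          (PySem.Chars.split₀ (PySem.Str.replace e "," " ").toList) := by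
    apply List.filterMap_congr
    intro x hx
    obtain ⟨hne, hws⟩ := pvSplit_tokens _ x hx
    have hid : PySem.Str.strip (String.ofList x) = String.ofList x := by
      rw [PySem.Str.strip]
      congr 1
      rw [String.toList_ofList]
      exact pvStrip_id x hws
    have hne' : String.ofList x ≠ "" := by
      intro hcon
      apply hne
      have := congrArg String.toList hcon
      rwa [String.toList_ofList] at this
    simp only [Function.comp_apply, hid, if_neg hne']
  rw [hcongr, List.filterMap_eq_map]

-- after the comma→space map, whitespace is exactly 'comma or whitespace'
theorem pvIsspace_map (c : Char) :
    PySem.Chars.isspace (pvCommaToSpace c) = (c = ',' ∨ PySem.Chars.isspace c : Bool) := by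
  by_cases hc : c = ','
  · subst hc; decide
  · simp [pvCommaToSpace, hc]

-- B's tokenizer computes the tokens of split₀ applied to the comma-mapped entry
theorem pvScanB_eq (l : List Char) (toks : List String) (cur : List Char) :
    pvScanB l toks cur =
      toks ++ (PySem.Chars.split₀.go (l.map pvCommaToSpace) cur.reverse []).map String.ofList := by
  induction l generalizing toks cur with
  | nil =>
    rw [pvScanB, List.map_nil, pvGo_nil]
    by_cases hc : cur = []
    · simp [hc]
    · simp [hc, List.isEmpty_iff]
  | cons c rest ih =>
    rw [pvScanB, List.map_cons, pvGo_cons, pvIsspace_map]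
    by_cases hcs : c = ',' ∨ PySem.Chars.isspace c
    · have hb : (c = ',' ∨ PySem.Chars.isspace c : Bool) = true := by
        rcases hcs with h | h <;> simp [h]
      rw [if_pos hcs, if_pos hb]
      by_cases hc : cur = []
      · rw [if_pos hc, ih, hc]
        simp
      · rw [if_neg hc, ih]
        have : ¬ (cur.reverse.isEmpty = true) := by simp [List.isEmpty_iff, hc]
        rw [if_neg this, pvSplitGo_acc_out _ [] [cur.reverse.reverse]]
        simp
    · have hb : ¬ ((c = ',' ∨ PySem.Chars.isspace c : Bool) = true) := by
        simp only [decide_eq_true_eq] at *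
        exact hcs
      rw [if_neg hcs, if_neg hb, ih]
      have hcc : pvCommaToSpace c = c := by
        simp [pvCommaToSpace]; intro h; exact absurd (Or.inl h) hcs
      rw [hcc]
      congr 2
      simp

-- both folds compute the same flatMap
theorem pvFold_eq (ts : List String) :
    ts.foldl (fun flattened entry =>
        flattened ++
          (PySem.Str.split₀ (PySem.Str.replace entry "," " ")).filterMap
            (fun part => let p := PySem.Str.strip part; if p = "" then none else some p)) []
      = ts.foldl (fun toks entry => pvScanB entry.toList toks []) [] := by
  have hrep : ∀ s : String, PySem.Str.split₀ (PySem.Str.replace s "," " ")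
      = List.map String.ofList (PySem.Chars.split₀ (s.toList.map pvCommaToSpace)) := by
    intro s
    rw [PySem.Str.split₀, PySem.Str.toList_replace,
      show ("," : String).toList = [','] from rfl, show (" " : String).toList = [' '] from rfl,
      pvReplace_comma]
  have hA : (fun (flattened : List String) (entry : String) =>
      flattened ++
        (PySem.Str.split₀ (PySem.Str.replace entry "," " ")).filterMap
          (fun part => let p := PySem.Str.strip part; if p = "" then none else some p))
      = fun flattened entry =>
        flattened ++ List.map String.ofList (PySem.Chars.split₀ (entry.toList.map pvCommaToSpace)) := by
    funext flattened entry
    rw [pvParts_eq, hrep]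
  have hB : (fun (toks : List String) (entry : String) => pvScanB entry.toList toks [])
      = fun toks entry =>
        toks ++ List.map String.ofList (PySem.Chars.split₀ (entry.toList.map pvCommaToSpace)) := by
    funext toks entry
    rw [pvScanB_eq]
    rfl
  rw [hA, hB]

-- ===== VERDICT (by name: the statement is the Claim_ definition above) =====
theorem parse_types_option_py_spec : Claim_equal_parse_types_option_py := by
  unfold Claim_equal_parse_types_option_py
  intro types _
  unfold Spec_parse_types_option_py parse_types_option_py parse_types_option_py_alt
  cases types with
  | none => rfl
  | some ts =>
    by_cases hts : ts = []
    · simp [hts]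
    · simp only [hts, if_false, pvFold_eq]
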